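-- pv_equiv track=rewrite | github.com/KayneFerreira/algorithm-exercises | _others/age_calculator.py | convertMonths
-- ===== SOURCE A (Python) =====
-- year_months = {
--     1: 31,
--     2: 28,
--     3: 31,
--     4: 30,
--     5: 31,
--     6: 30,
--     7: 31,
--     8: 31,
--     9: 30,
--     10: 31,
--     11: 30,
--     12: 31
-- }
--
-- def convertMonths(month, this_month, this_year):
--     days = 0
--     start = month
--     finish = this_month
--     if this_month > month:
--         for month_l in range(start, finish):
--             days += year_months[month_l]
--     elif this_month < month:
--         start = this_month
--         finish = 12 - (month - this_month)
--         for month_l in range(start, finish):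
--             days -= year_months[month_l]
--     return days
-- ===== SOURCE B (Python) =====
-- # days before month i (1-based): _CUM[i] = sum of year_months[1..i-1]; _CUM[13] = 365
-- _CUM = [0, 0, 31, 59, 90, 120, 151, 181, 212, 243, 273, 304, 334, 365]
--
-- def convertMonths(month, this_month, this_year):
--     if this_month > month:
--         return _CUM[this_month] - _CUM[month]
--     if this_month < month:
--         finish = 12 - (month - this_month)
--         if finish > this_month:
--             return _CUM[this_month] - _CUM[finish]
--     return 0
-- ===== Notes on version B (the rewrite author's own statement) =====
-- stated objective: simpler
-- what changed: Replaces both per-month accumulation loops over the month-length dict with closed-form lookups in a precomputed prefix-sum table of days-before-month.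
-- outside the precondition, e.g. on convertMonths(0, 3, 2020): A raises KeyError, B returns 59; on convertMonths(5, 14, 2020): A raises KeyError, B raises IndexError
import Mathlib
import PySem

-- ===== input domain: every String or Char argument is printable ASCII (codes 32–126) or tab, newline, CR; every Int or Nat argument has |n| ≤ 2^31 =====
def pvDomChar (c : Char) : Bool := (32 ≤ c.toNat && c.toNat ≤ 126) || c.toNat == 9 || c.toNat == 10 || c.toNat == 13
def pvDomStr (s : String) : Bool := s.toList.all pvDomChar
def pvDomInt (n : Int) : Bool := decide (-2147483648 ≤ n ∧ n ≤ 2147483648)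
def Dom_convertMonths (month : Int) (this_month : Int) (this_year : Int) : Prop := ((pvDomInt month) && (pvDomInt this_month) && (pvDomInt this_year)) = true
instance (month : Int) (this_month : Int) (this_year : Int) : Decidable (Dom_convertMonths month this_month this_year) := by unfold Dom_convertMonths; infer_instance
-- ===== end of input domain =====

-- B replaces A's two bounded accumulation loops by closed-form lookups in a prefix-sum table (objective: simpler).

-- ===== PORT A =====
-- the module-level dict year_months
def yearMonths : PySem.Dict Int Int :=
  PySem.Dict.ofList [(1, 31), (2, 28), (3, 31), (4, 30), (5, 31), (6, 30),
                     (7, 31), (8, 31), (9, 30), (10, 31), (11, 30), (12, 31)]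

-- literal port of A; year_months[m] would raise KeyError on a missing key, so the
-- lookup is getD _ 0 and Pre_ excludes exactly the inputs where a missing key is hit
def convertMonths (month : Int) (this_month : Int) (this_year : Int) : Int :=
  let days : Int := 0
  let start := month
  let finish := this_month
  if this_month > month then
    (PySem.List.pyRange start finish 1).foldl (fun d m => d + yearMonths.getD m 0) days
  else if this_month < month then
    let start := this_month
    let finish := 12 - (month - this_month)
    (PySem.List.pyRange start finish 1).foldl (fun d m => d - yearMonths.getD m 0) days
  else days

-- ===== PORT B =====
-- the module-level prefix table _CUM (days before month i); _CUM[i] with i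
-- in range under Pre_, so the list index is pyGetD with default 0
def cumDays : List Int := [0, 0, 31, 59, 90, 120, 151, 181, 212, 243, 273, 304, 334, 365]

def convertMonths_alt (month : Int) (this_month : Int) (this_year : Int) : Int :=
  if this_month > month then
    PySem.List.pyGetD cumDays this_month 0 - PySem.List.pyGetD cumDays month 0
  else if this_month < month then
    let finish := 12 - (month - this_month)
    if finish > this_month then
      PySem.List.pyGetD cumDays this_month 0 - PySem.List.pyGetD cumDays finish 0
    else 0
  else 0

-- ===== PRECONDITION & SPEC =====
-- Pre_ excludes exactly the inputs on which A raises KeyError: a month index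
-- outside 1..12 reached by one of the two range loops.
def Pre_convertMonths (month : Int) (this_month : Int) (this_year : Int) : Prop :=
  (month < this_month → 1 ≤ month ∧ this_month ≤ 13) ∧
  (this_month < month → this_month < 12 - (month - this_month) → 1 ≤ this_month)
instance (month : Int) (this_month : Int) (this_year : Int) : Decidable (Pre_convertMonths month this_month this_year) := by unfold Pre_convertMonths; infer_instance

def pvWitness_convertMonths : Int × Int × Int := (3, 7, 2020)

def Spec_convertMonths (month : Int) (this_month : Int) (this_year : Int) (out : Int) : Prop := out = convertMonths_alt month this_month this_year
instance (month : Int) (this_month : Int) (this_year : Int) (out : Int) : Decidable (Spec_convertMonths month this_month this_year out) := by unfold Spec_convertMonths; infer_instance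

-- ===== CLAIM (what is proved, stated in full; the proofs are below) =====
def Claim_equal_convertMonths : Prop := ∀ (month : Int) (this_month : Int) (this_year : Int), Dom_convertMonths month this_month this_year → Pre_convertMonths month this_month this_year → Spec_convertMonths month this_month this_year (convertMonths month this_month this_year)

-- ===== LEMMAS AND PROOFS =====

-- ===== VERDICT (by name: the statement is the Claim_ definition above) =====
theorem convertMonths_spec : Claim_equal_convertMonths := by
  intro month this_month this_year _ hpre
  unfold Spec_convertMonths convertMonths convertMonths_alt
  obtain ⟨h1, h2⟩ := hpre
  rcases lt_trichotomy month this_month with hlt | heq | hgt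
  · obtain ⟨hm1, ht13⟩ := h1 hlt
    have hm12 : month ≤ 12 := by omega
    simp only [show this_month > month from hlt, if_pos]
    interval_cases month <;> interval_cases this_month <;> decide
  · simp [heq]
  · by_cases hfin : this_month < 12 - (month - this_month)
    · have ht1 : 1 ≤ this_month := h2 hgt hfin
      have hm11 : month ≤ 11 := by omega
      have ht10 : this_month ≤ 10 := by omega
      simp only [show ¬ this_month > month by omega, if_neg, not_false_iff,
                 show this_month < month from hgt, if_pos]
      interval_cases this_month <;> interval_cases month <;> decide
    · have hnil : PySem.List.pyRange this_month (12 - (month - this_month)) 1 = [] :=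
        PySem.List.pyRange_one_eq_nil (by omega)
      simp [show ¬ this_month > month by omega, hgt, hnil, show ¬ (12 - (month - this_month) > this_month) by omega]
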